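-- pv_equiv track=rewrite | github.com/AtomicLeap/Data-Strutures-and-Algorithms | Algorithms/Dynamic Programming/Memoization/all_construct.py | all_construct
-- ===== SOURCE A (Python) =====
-- def all_construct(target: str, word_bank: list[str]) -> list[list[str]] | list:
--     if target == '':
--         return [[]]
--
--     total_construct = []
--
--     for word in word_bank:
--         if target.startswith(word):
--             suffix = target[len(word):]
--             construct = all_construct(suffix, word_bank)
--             total_construct += [[word, *item] for item in construct]
--     return total_construct
-- ===== SOURCE B (Python) =====
-- def all_construct(target: str, word_bank: list[str]) -> list[list[str]] | list:
--     # Top-down DP: memoize the full list of constructions per suffix position,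
--     # so each reachable suffix is solved once instead of exponentially often.
--     memo = {len(target): [[]]}
--
--     def go(i):
--         if i in memo:
--             return memo[i]
--         res = []
--         for w in word_bank:
--             if target.startswith(w, i):
--                 res += [[w] + rest for rest in go(i + len(w))]
--         memo[i] = res
--         return res
--
--     return go(0)
-- ===== Notes on version B (the rewrite author's own statement) =====
-- stated objective: alternative
-- what changed: Replaces A's plain top-down recursion (which re-solves the same suffix position many times) with a memoized recursion keyed by suffix position, so each reachable suffix is solved once.
import Mathlib
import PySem

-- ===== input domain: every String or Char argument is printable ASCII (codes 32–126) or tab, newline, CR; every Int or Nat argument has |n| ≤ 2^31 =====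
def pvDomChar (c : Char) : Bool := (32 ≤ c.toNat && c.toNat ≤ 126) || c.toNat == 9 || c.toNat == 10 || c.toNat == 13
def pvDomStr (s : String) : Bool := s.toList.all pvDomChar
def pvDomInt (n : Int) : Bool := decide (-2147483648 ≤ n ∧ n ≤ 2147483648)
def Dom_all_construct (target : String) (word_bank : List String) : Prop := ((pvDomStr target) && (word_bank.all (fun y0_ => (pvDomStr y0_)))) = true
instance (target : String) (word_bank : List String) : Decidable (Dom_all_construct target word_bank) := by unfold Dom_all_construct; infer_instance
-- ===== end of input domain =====

-- B replaces A's plain recursion over suffixes by a memoized recursion keyed by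
-- suffix position, so each reachable suffix is solved once; objective: alternative.

-- ===== PORT A =====
-- A's recursion is unbounded in Python when '' ∈ word_bank (it diverges there);
-- the port carries a fuel argument, supplied as target.length + 1 at the top,
-- which suffices on every input admitted by Pre_ (proved in the lemmas below).
-- target[len(word):] with a nonnegative in-range start is exactly List.drop.
def allConstructA (word_bank : List String) : Nat → List Char → List (List String)
  | 0, _ => []
  | fuel + 1, t =>
    if t = [] then [([] : List String)] else
    word_bank.foldl (fun acc w =>
      if PySem.Chars.startswith t w.toList then
        acc ++ (allConstructA word_bank fuel (t.drop w.toList.length)).map (fun item => w :: item)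
      else acc) []

def all_construct (target : String) (word_bank : List String) : List (List String) :=
  allConstructA word_bank (target.toList.length + 1) target.toList

-- ===== PORT B =====
-- go(i) with the memo dict threaded through; Python's recursion is unbounded
-- when '' ∈ word_bank (it raises RecursionError there, like A), so the port
-- carries a fuel argument, supplied as target.length + 1 at the top.
def goB (t : List Char) (word_bank : List String) :
    Nat → Nat → PySem.Dict Nat (List (List String)) →
      List (List String) × PySem.Dict Nat (List (List String))
  | 0, _, memo => ([], memo)
  | fuel + 1, i, memo =>
    match memo.get? i with
    | some r => (r, memo)
    | none =>
      let p := word_bank.foldl (fun p w =>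
        if PySem.Chars.startswith (t.drop i) w.toList then
          let q := goB t word_bank fuel (i + w.toList.length) p.2
          (p.1 ++ q.1.map (fun item => w :: item), q.2)
        else p) ([], memo)
      (p.1, p.2.insert i p.1)

def all_construct_alt (target : String) (word_bank : List String) : List (List String) :=
  (goB target.toList word_bank (target.toList.length + 1) 0
    (PySem.Dict.empty.insert target.toList.length [[]])).1

-- ===== PRECONDITION & SPEC =====
-- Pre_ excludes only the inputs on which A raises RecursionError: a nonempty
-- target with the empty word in the bank (A then recurses on the same target forever).
def Pre_all_construct (target : String) (word_bank : List String) : Prop :=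
  target = "" ∨ "" ∉ word_bank
instance (target : String) (word_bank : List String) : Decidable (Pre_all_construct target word_bank) := by unfold Pre_all_construct; infer_instance

def pvWitness_all_construct : String × List String := ("abcd", ["ab", "cd", "abc", "d", "abcd"])

def Spec_all_construct (target : String) (word_bank : List String) (out : List (List String)) : Prop := out = all_construct_alt target word_bank
instance (target : String) (word_bank : List String) (out : List (List String)) : Decidable (Spec_all_construct target word_bank out) := by unfold Spec_all_construct; infer_instance

-- ===== CLAIM (what is proved, stated in full; the proofs are below) =====
def Claim_equal_all_construct : Prop := ∀ (target : String) (word_bank : List String), Dom_all_construct target word_bank → Pre_all_construct target word_bank → Spec_all_construct target word_bank (all_construct target word_bank)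

-- ===== LEMMAS AND PROOFS =====

theorem nonempty_of_mem_bank {word_bank : List String} {w : String}
    (hwb : "" ∉ word_bank) (hw : w ∈ word_bank) : w.toList ≠ [] := by
  intro h
  exact hwb (by simpa [show w = "" from by_contra fun hne => hne (String.ext h)] using hw)

theorem startswith_len_le {t : List Char} {w : String}
    (h : PySem.Chars.startswith t w.toList = true) : w.toList.length ≤ t.length :=
  (PySem.Chars.startswith_iff t w.toList).1 h |>.length_le

-- A's result does not depend on the fuel as long as it exceeds the target length
-- (all bank words nonempty).
theorem allA_fuel {word_bank : List String} (hwb : "" ∉ word_bank) :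
    ∀ (f₁ f₂ : Nat) (t : List Char), t.length < f₁ → t.length < f₂ →
      allConstructA word_bank f₁ t = allConstructA word_bank f₂ t := by
  intro f₁
  induction f₁ with
  | zero => intro f₂ t h₁ _; omega
  | succ f₁ ih =>
    intro f₂ t h₁ h₂
    match f₂ with
    | 0 => omega
    | f₂ + 1 =>
      by_cases ht : t = []
      · simp [allConstructA, ht]
      · simp only [allConstructA, if_neg ht]
        refine PySem.List.foldl_congr_mem word_bank _ _ [] (fun acc w hw => ?_)
        by_cases hs : PySem.Chars.startswith t w.toList = true
        · have hwne := nonempty_of_mem_bank hwb hw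
          have hlen : 1 ≤ w.toList.length := by
            cases h : w.toList with
            | nil => exact absurd h hwne
            | cons a l => simp
          have hle := startswith_len_le hs
          have htpos : 0 < t.length := by
            cases t with
            | nil => exact absurd rfl ht
            | cons a l => simp
          rw [if_pos hs, if_pos hs,
            ih f₂ (t.drop w.toList.length) (by rw [List.length_drop]; omega)
              (by rw [List.length_drop]; omega)]
        · rw [if_neg hs, if_neg hs]

-- Canonical value of A at a suffix, with just enough fuel.
def aVal (word_bank : List String) (s : List Char) : List (List String) :=
  allConstructA word_bank (s.length + 1) s

-- The memo only ever stores correct suffix results, and always knows position t.length.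
def GoodB (t : List Char) (word_bank : List String)
    (memo : PySem.Dict Nat (List (List String))) : Prop :=
  memo.get? t.length = some [[]] ∧
  ∀ i r, memo.get? i = some r → r = aVal word_bank (t.drop i)

-- With a good memo and enough fuel, go(i) returns A's value for the suffix at i
-- and leaves the memo good.
theorem goB_spec {word_bank : List String} (hwb : "" ∉ word_bank) (t : List Char) :
    ∀ (fuel i : Nat) (memo : PySem.Dict Nat (List (List String))),
      i ≤ t.length → t.length - i < fuel → GoodB t word_bank memo →
      (goB t word_bank fuel i memo).1 = aVal word_bank (t.drop i) ∧
      GoodB t word_bank (goB t word_bank fuel i memo).2 := by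
  intro fuel
  induction fuel with
  | zero => intro i memo hi hf _; omega
  | succ fuel ih =>
    intro i memo hi hf hg
    cases hmem : memo.get? i with
    | some r =>
      have h1 : goB t word_bank (fuel + 1) i memo = (r, memo) := by
        simp [goB, hmem]
      rw [h1]
      exact ⟨hg.2 i r hmem, hg⟩
    | none =>
      have hne : i ≠ t.length := by
        intro h; rw [h, hg.1] at hmem; simp at hmem
      have hil : i < t.length := by omega
      have hslen : (t.drop i).length = t.length - i := by
        rw [List.length_drop]
      have hsne : t.drop i ≠ [] := by
        intro h; rw [h] at hslen; simp at hslen; omega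
      -- the fold, against the canonical per-word values
      have key : ∀ (ws : List String), (∀ w ∈ ws, w ∈ word_bank) →
          ∀ (acc : List (List String)) (m : PySem.Dict Nat (List (List String))),
            GoodB t word_bank m →
            (ws.foldl (fun p w =>
              if PySem.Chars.startswith (t.drop i) w.toList then
                let q := goB t word_bank fuel (i + w.toList.length) p.2
                (p.1 ++ q.1.map (fun item => w :: item), q.2)
              else p) (acc, m)).1 =
              ws.foldl (fun a w =>
                if PySem.Chars.startswith (t.drop i) w.toList then
                  a ++ (aVal word_bank (t.drop (i + w.toList.length))).map (fun item => w :: item)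
                else a) acc ∧
            GoodB t word_bank ((ws.foldl (fun p w =>
              if PySem.Chars.startswith (t.drop i) w.toList then
                let q := goB t word_bank fuel (i + w.toList.length) p.2
                (p.1 ++ q.1.map (fun item => w :: item), q.2)
              else p) (acc, m)).2) := by
        intro ws
        induction ws with
        | nil => intro _ acc m hm; exact ⟨rfl, hm⟩
        | cons w ws ihws =>
          intro hmemb acc m hm
          simp only [List.foldl_cons]
          by_cases hsw : PySem.Chars.startswith (t.drop i) w.toList = true
          · have hwne := nonempty_of_mem_bank hwb (hmemb w (by simp))
            have hlen : 1 ≤ w.toList.length := by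
              cases h : w.toList with
              | nil => exact absurd h hwne
              | cons a l => simp
            have hle : w.toList.length ≤ t.length - i := by
              have := startswith_len_le hsw; omega
            obtain ⟨hq1, hq2⟩ := ih (i + w.toList.length) m (by omega) (by omega) hm
            rw [if_pos hsw, if_pos hsw]
            show ((ws.foldl _ (acc ++ (goB t word_bank fuel (i + w.toList.length) m).1.map
                (fun item => w :: item), (goB t word_bank fuel (i + w.toList.length) m).2)).1 = _) ∧ _
            rw [hq1]
            exact ihws (fun x hx => hmemb x (by simp [hx])) _ _ hq2
          · rw [if_neg hsw, if_neg hsw]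
            exact ihws (fun x hx => hmemb x (by simp [hx])) acc m hm
      obtain ⟨hk1, hk2⟩ := key word_bank (fun _ h => h) [] memo hg
      -- the canonical fold IS aVal at position i
      have hcanon : word_bank.foldl (fun a w =>
          if PySem.Chars.startswith (t.drop i) w.toList then
            a ++ (aVal word_bank (t.drop (i + w.toList.length))).map (fun item => w :: item)
          else a) [] = aVal word_bank (t.drop i) := by
        have hRHS : aVal word_bank (t.drop i) =
            word_bank.foldl (fun acc w =>
              if PySem.Chars.startswith (t.drop i) w.toList then
                acc ++ (allConstructA word_bank (t.length - i)
                  ((t.drop i).drop w.toList.length)).map (fun item => w :: item)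
              else acc) [] := by
          rw [aVal, hslen]
          have : t.length - i = (t.length - i - 1) + 1 := by omega
          rw [this]
          simp only [allConstructA, if_neg hsne]
        rw [hRHS]
        refine PySem.List.foldl_congr_mem word_bank _ _ [] (fun acc w hw => ?_)
        by_cases hsw : PySem.Chars.startswith (t.drop i) w.toList = true
        · have hwne := nonempty_of_mem_bank hwb hw
          have hlen : 1 ≤ w.toList.length := by
            cases h : w.toList with
            | nil => exact absurd h hwne
            | cons a l => simp
          have hle : w.toList.length ≤ t.length - i := by
            have := startswith_len_le hsw; omega
          have hdrop : (t.drop i).drop w.toList.length = t.drop (i + w.toList.length) := by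
            rw [List.drop_drop, Nat.add_comm]
          have hdlen : ((t.drop i).drop w.toList.length).length = t.length - i - w.toList.length := by
            rw [List.length_drop, hslen]
          rw [if_pos hsw, if_pos hsw, ← hdrop, aVal,
            allA_fuel hwb _ (t.length - i) _ (by omega) (by omega)]
        · rw [if_neg hsw, if_neg hsw]
      have hstep : goB t word_bank (fuel + 1) i memo =
          ((word_bank.foldl (fun p w =>
              if PySem.Chars.startswith (t.drop i) w.toList then
                let q := goB t word_bank fuel (i + w.toList.length) p.2
                (p.1 ++ q.1.map (fun item => w :: item), q.2)
              else p) ([], memo)).1,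
           (word_bank.foldl (fun p w =>
              if PySem.Chars.startswith (t.drop i) w.toList then
                let q := goB t word_bank fuel (i + w.toList.length) p.2
                (p.1 ++ q.1.map (fun item => w :: item), q.2)
              else p) ([], memo)).2.insert i
           (word_bank.foldl (fun p w =>
              if PySem.Chars.startswith (t.drop i) w.toList then
                let q := goB t word_bank fuel (i + w.toList.length) p.2
                (p.1 ++ q.1.map (fun item => w :: item), q.2)
              else p) ([], memo)).1) := by
        simp [goB, hmem]
      rw [hstep]
      refine ⟨by rw [hk1, hcanon], ?_, ?_⟩
      · rw [PySem.Dict.get?_insert_of_ne _ _ (fun h => hne h.symm)]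
        exact hk2.1
      · intro j r hj
        rw [PySem.Dict.get?_insert] at hj
        by_cases hji : j = i
        · rw [if_pos hji] at hj
          subst hji
          rw [← Option.some.inj hj, hk1, hcanon]
        · rw [if_neg hji] at hj
          exact hk2.2 j r hj

-- ===== VERDICT (by name: the statement is the Claim_ definition above) =====
theorem all_construct_spec : Claim_equal_all_construct := by
  intro target word_bank _ hpre
  unfold Spec_all_construct all_construct all_construct_alt
  rcases Nat.eq_zero_or_pos target.toList.length with h0 | hpos
  · have ht : target.toList = [] := List.eq_nil_of_length_eq_zero h0
    simp [ht, goB, allConstructA, PySem.Dict.get?_insert_self]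
  · have hwb : "" ∉ word_bank := by
      rcases hpre with h | h
      · exfalso
        have : target.toList = [] := by rw [h]; rfl
        rw [this] at hpos; simp at hpos
      · exact h
    have hg : GoodB target.toList word_bank
        (PySem.Dict.empty.insert target.toList.length [[]]) := by
      refine ⟨PySem.Dict.get?_insert_self _ _ _, fun i r hir => ?_⟩
      rw [PySem.Dict.get?_insert] at hir
      by_cases hi : i = target.toList.length
      · rw [if_pos hi] at hir
        have hr : r = [[]] := (Option.some.inj hir).symm
        rw [hr, hi, List.drop_length]
        rfl
      · rw [if_neg hi] at hir
        rw [PySem.Dict.get?_empty] at hir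
        simp at hir
    obtain ⟨h1, _⟩ := goB_spec hwb target.toList (target.toList.length + 1) 0 _
      (by omega) (by omega) hg
    rw [h1]
    rfl
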